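-- pv_equiv track=rewrite | github.com/wbornus/Technologia-Mowy---Speech2SignLanguage | python_backend/tm-clients-master/dictation/dictation_client.py | search_over_phrases
-- ===== SOURCE A (Python) =====
-- def search_over_phrases(results_str, phrases):
--     """
--     :param results_str: string recognized from dictation
--     :param phrases: phrases to search over
--     :return: idx: index of key_phrase for gif to be displayed
--     """
--     is_found = False
--     for idx in range(len(phrases)):
--         for phrase in phrases[idx]:
--             if results_str == phrase:
--                 is_found = True
--                 return idx
--     if is_found == False:
--         return -1
-- ===== SOURCE B (Python) =====
-- def search_over_phrases(results_str, phrases):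
--     """
--     :param results_str: string recognized from dictation
--     :param phrases: phrases to search over
--     :return: idx: index of key_phrase for gif to be displayed
--     """
--     index = {}
--     for idx, group in enumerate(phrases):
--         for phrase in group:
--             index.setdefault(phrase, idx)
--     return index.get(results_str, -1)
-- ===== Notes on version B (the rewrite author's own statement) =====
-- stated objective: alternative
-- what changed: Replaces the nested scan-and-return with building a phrase-to-first-group-index dict via setdefault in one pass, then a single constant-time lookup with default -1.
import Mathlib
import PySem

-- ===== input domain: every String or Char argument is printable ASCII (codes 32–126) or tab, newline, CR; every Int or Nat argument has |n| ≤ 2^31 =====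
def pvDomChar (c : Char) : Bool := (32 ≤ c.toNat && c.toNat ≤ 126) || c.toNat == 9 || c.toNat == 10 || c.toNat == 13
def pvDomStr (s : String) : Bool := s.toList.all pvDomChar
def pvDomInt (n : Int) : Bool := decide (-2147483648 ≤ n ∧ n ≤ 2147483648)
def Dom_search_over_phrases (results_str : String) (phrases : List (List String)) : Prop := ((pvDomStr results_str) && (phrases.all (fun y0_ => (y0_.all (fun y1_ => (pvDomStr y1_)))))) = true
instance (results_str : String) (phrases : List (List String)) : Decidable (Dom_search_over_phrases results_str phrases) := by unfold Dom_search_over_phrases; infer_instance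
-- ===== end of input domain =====

-- B replaces A's nested scan-and-return with a one-pass dict (phrase -> first group index,
-- via setdefault) followed by a single lookup with default -1; alternative shape, same cost.


-- ===== PORT A =====
-- inner 'for phrase in phrases[idx]: if results_str == phrase: return idx'
def soaInner (results_str : String) : List String → Bool
  | [] => false
  | phrase :: rest => if results_str == phrase then true else soaInner results_str rest

-- outer 'for idx in range(len(phrases))' with the running index; falls through to -1
def soaGo (results_str : String) : List (List String) → Int → Int
  | [], _ => -1
  | g :: rest, idx => if soaInner results_str g then idx else soaGo results_str rest (idx + 1)

def search_over_phrases (results_str : String) (phrases : List (List String)) : Int :=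
  soaGo results_str phrases 0

-- ===== PORT B =====
-- build {phrase: first group index} with setdefault, then one lookup with default -1
def search_over_phrases_alt (results_str : String) (phrases : List (List String)) : Int :=
  ((PySem.List.enumerate phrases).foldl
      (fun d ig => ig.2.foldl (fun d phrase => d.setdefault phrase ig.1) d)
      PySem.Dict.empty).getD results_str (-1)

-- ===== PRECONDITION & SPEC =====
def Spec_search_over_phrases (results_str : String) (phrases : List (List String)) (out : Int) : Prop := out = search_over_phrases_alt results_str phrases
instance (results_str : String) (phrases : List (List String)) (out : Int) : Decidable (Spec_search_over_phrases results_str phrases out) := by unfold Spec_search_over_phrases; infer_instance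

-- ===== CLAIM (what is proved, stated in full; the proofs are below) =====
def Claim_equal_search_over_phrases : Prop := ∀ (results_str : String) (phrases : List (List String)), Dom_search_over_phrases results_str phrases → Spec_search_over_phrases results_str phrases (search_over_phrases results_str phrases)

-- ===== LEMMAS AND PROOFS =====

-- the inner setdefault fold: an existing binding survives; otherwise the group binds rs to i iff it contains rs
theorem soa_inner_get? (results_str : String) (i : Int) (g : List String)
    (d : PySem.Dict String Int) :
    (g.foldl (fun d phrase => d.setdefault phrase i) d).get? results_str
      = match d.get? results_str with
        | some v => some v
        | none => if soaInner results_str g then some i else none := by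
  induction g generalizing d with
  | nil => cases h : d.get? results_str <;> simp [soaInner, h]
  | cons p rest ih =>
    simp only [List.foldl_cons, ih]
    by_cases hc : d.contains p
    · rw [PySem.Dict.setdefault_of_contains (h := hc)]
      cases h : d.get? results_str with
      | some v => rfl
      | none =>
        have hne : results_str ≠ p := by
          intro he; subst he
          rw [PySem.Dict.contains_eq_isSome_get?, h] at hc; simp at hc
        simp [soaInner, hne]
    · rw [PySem.Dict.setdefault_of_not_contains (h := by simpa using hc)]
      by_cases he : results_str = p
      · subst he
        have h : d.get? results_str = none := by
          rw [PySem.Dict.contains_eq_isSome_get?] at hc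
          cases h : d.get? results_str <;> simp [h] at hc ⊢
        rw [PySem.Dict.get?_insert_self]
        simp [h, soaInner]
      · rw [PySem.Dict.get?_insert_of_ne d i he]
        cases h : d.get? results_str <;> simp [soaInner, he]

-- the outer fold: a binding already in d wins; otherwise the lookup is A's remaining scan from index i
theorem soa_outer (results_str : String) (groups : List (List String)) (i : Int)
    (d : PySem.Dict String Int) :
    ((PySem.List.enumerate groups i).foldl
        (fun d ig => ig.2.foldl (fun d phrase => d.setdefault phrase ig.1) d) d).getD results_str (-1)
      = match d.get? results_str with
        | some v => v
        | none => soaGo results_str groups i := by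
  induction groups generalizing i d with
  | nil =>
    simp only [PySem.List.enumerate_nil, List.foldl_nil]
    rw [PySem.Dict.getD_eq_get?_getD]
    cases h : d.get? results_str <;> simp [soaGo]
  | cons g rest ih =>
    rw [PySem.List.enumerate_cons, List.foldl_cons, ih]
    rw [soa_inner_get? results_str i g d]
    cases h : d.get? results_str with
    | some v => rfl
    | none =>
      by_cases hf : soaInner results_str g <;> simp [soaGo, hf]

-- ===== VERDICT (by name: the statement is the Claim_ definition above) =====
theorem search_over_phrases_spec : Claim_equal_search_over_phrases := by
  intro results_str phrases _
  unfold Spec_search_over_phrases search_over_phrases search_over_phrases_alt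
  rw [soa_outer results_str phrases 0 PySem.Dict.empty]
  simp [PySem.Dict.get?_empty]
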